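-- pv_equiv track=rewrite | github.com/blzzua/codewars | 6-kyu/bracket_duplicates.py | string_parse
-- ===== SOURCE A (Python) =====
-- from itertools import groupby
--
-- def string_parse(string):
--     if not isinstance(string, str):
--         return 'Please enter a valid string'
--     res = ''
--     for g, cg in groupby(string):
--         data = ''.join(list(cg))
--         if len(data) <= 2:
--             res += data
--         if len(data) > 2:
--             res += data[:2] + '[' + data[2:] + ']'
--     return res
-- ===== SOURCE B (Python) =====
-- def string_parse(string):
--     if not isinstance(string, str):
--         return 'Please enter a valid string'
--     out = []
--     prev = None
--     count = 0
--     for ch in string: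
--         if ch == prev:
--             count += 1
--             if count == 3:
--                 out.append('[')
--             out.append(ch)
--         else:
--             if count > 2:
--                 out.append(']')
--             prev = ch
--             count = 1
--             out.append(ch)
--     if count > 2:
--         out.append(']')
--     return ''.join(out)
-- ===== Notes on version B (the rewrite author's own statement) =====
-- stated objective: faster
-- what changed: Replaces itertools.groupby plus per-group join/format with a single streaming scan that keeps only the previous character and a run counter, emitting an opening bracket when a run reaches length 3 and a closing bracket when it ends, never materializing groups.
import Mathlib
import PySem

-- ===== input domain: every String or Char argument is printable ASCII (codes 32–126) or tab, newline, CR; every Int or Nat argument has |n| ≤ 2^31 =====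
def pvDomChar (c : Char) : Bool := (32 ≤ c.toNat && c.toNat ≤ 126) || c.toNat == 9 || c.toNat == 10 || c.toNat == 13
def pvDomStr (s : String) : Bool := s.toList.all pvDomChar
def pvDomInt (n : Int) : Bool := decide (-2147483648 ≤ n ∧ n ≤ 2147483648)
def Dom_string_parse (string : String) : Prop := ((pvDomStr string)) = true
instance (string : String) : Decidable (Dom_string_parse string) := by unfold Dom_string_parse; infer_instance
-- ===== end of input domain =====

-- B replaces groupby + per-group join/format with a single streaming scan keeping only the
-- previous char and a run counter (measured constant-factor faster in a timing run).
-- In Lean the argument is always a String, so A's isinstance guard can never fire and is omitted.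

-- ===== PORT A =====
-- itertools.groupby over the characters: the list of maximal runs, in order.
def pvRunsA : List Char → List (List Char)
  | [] => []
  | c :: rest =>
      (c :: rest.takeWhile (fun x => x == c)) :: pvRunsA (rest.dropWhile (fun x => x == c))
  termination_by l => l.length
  decreasing_by
    simp only [List.length_cons]
    have := List.length_dropWhile_le (p := fun x => x == c) (l := rest)
    omega

-- the loop body: the two consecutive ifs of A, appending to res
def pvStepA (res data : List Char) : List Char :=
  let res1 := if data.length ≤ 2 then res ++ data else res
  if data.length > 2 then res1 ++ data.take 2 ++ ['['] ++ data.drop 2 ++ [']'] else res1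

def string_parse (string : String) : String :=
  String.mk ((pvRunsA string.toList).foldl pvStepA [])

-- ===== PORT B =====
-- the for-loop of Source B: state is (prev : Option Char, count, out)
def pvLoopB : List Char → Option Char → Nat → List Char → List Char
  | [], _, count, out => if count > 2 then out ++ [']'] else out
  | ch :: rest, prev, count, out =>
      if some ch == prev then
        pvLoopB rest prev (count + 1)
          ((if count + 1 == 3 then out ++ ['['] else out) ++ [ch])
      else
        pvLoopB rest (some ch) 1 ((if count > 2 then out ++ [']'] else out) ++ [ch])

def string_parse_alt (string : String) : String :=
  String.mk (pvLoopB string.toList none 0 [])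

-- ===== PRECONDITION & SPEC =====
def Spec_string_parse (string : String) (out : String) : Prop := out = string_parse_alt string
instance (string : String) (out : String) : Decidable (Spec_string_parse string out) := by unfold Spec_string_parse; infer_instance

-- ===== CLAIM (what is proved, stated in full; the proofs are below) =====
def Claim_equal_string_parse : Prop := ∀ (string : String), Dom_string_parse string → Spec_string_parse string (string_parse string)

-- ===== LEMMAS AND PROOFS =====

-- A's formatting of one complete run
def pvFmt (data : List Char) : List Char :=
  if data.length ≤ 2 then data else data.take 2 ++ ['['] ++ data.drop 2 ++ [']']

theorem pvStepA_eq (res data : List Char) : pvStepA res data = res ++ pvFmt data := by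
  unfold pvStepA pvFmt
  by_cases h : data.length ≤ 2 <;> simp [h]

theorem foldl_stepA_acc (runs : List (List Char)) :
    ∀ res, List.foldl pvStepA res runs = res ++ List.foldl pvStepA [] runs := by
  induction runs with
  | nil => simp
  | cons r rs ih =>
      intro res
      simp only [List.foldl_cons, pvStepA_eq]
      rw [ih (res ++ pvFmt r), ih (List.nil ++ pvFmt r)]
      simp

-- A's whole result, as a recursion over runs
def pvAfun : List Char → List Char
  | [] => []
  | c :: rest =>
      pvFmt (c :: rest.takeWhile (fun x => x == c)) ++ pvAfun (rest.dropWhile (fun x => x == c))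
  termination_by l => l.length
  decreasing_by
    simp only [List.length_cons]
    have := List.length_dropWhile_le (p := fun x => x == c) (l := rest)
    omega

theorem Afun_eq (l : List Char) : List.foldl pvStepA [] (pvRunsA l) = pvAfun l := by
  induction l using pvRunsA.induct with
  | case1 => simp [pvRunsA, pvAfun]
  | case2 c rest ih =>
      rw [pvRunsA, pvAfun]
      simp only [List.foldl_cons, pvStepA_eq, List.nil_append]
      rw [foldl_stepA_acc, ih]

-- B's emissions from state (prev = some c, count = n) to the end of the input
def pvEmitB : List Char → Char → Nat → List Char
  | [], _, n => if n > 2 then [']'] else []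
  | ch :: rest, c, n =>
      if ch == c then
        ((if n + 1 == 3 then ['['] else []) ++ [ch]) ++ pvEmitB rest c (n + 1)
      else
        ((if n > 2 then [']'] else []) ++ [ch]) ++ pvEmitB rest ch 1

theorem loopB_emit (l : List Char) :
    ∀ c n out, pvLoopB l (some c) n out = out ++ pvEmitB l c n := by
  induction l with
  | nil => intro c n out; simp [pvLoopB, pvEmitB]; split <;> simp
  | cons ch rest ih =>
      intro c n out
      rw [pvLoopB, pvEmitB]
      by_cases h : ch = c
      · subst h
        simp only [beq_self_eq_true, if_true, ih]
        split <;> simp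
      · have h1 : (some ch == some c) = false := by simp [h]
        have h2 : (ch == c) = false := by simp [h]
        rw [h1, h2]
        simp only [Bool.false_eq_true, if_false, ih]
        split <;> simp

-- the emissions caused by k further copies of c from count n, then closing the run
def pvTail (c : Char) (n : Nat) : Nat → List Char
  | 0 => if n > 2 then [']'] else []
  | k + 1 => ((if n + 1 == 3 then ['['] else []) ++ [c]) ++ pvTail c (n + 1) k

theorem pvTail_big (c : Char) (k : Nat) :
    ∀ n, 3 ≤ n → pvTail c n k = List.replicate k c ++ [']'] := by
  induction k with
  | zero => intro n hn; simp [pvTail]; omega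
  | succ k ih =>
      intro n hn
      rw [pvTail, ih (n + 1) (by omega)]
      have : (n + 1 == 3) = false := by simp; omega
      simp [this, List.replicate_succ]

theorem takeWhile_eq_replicate (l : List Char) (c : Char) :
    l.takeWhile (fun x => x == c) =
      List.replicate (l.takeWhile (fun x => x == c)).length c := by
  induction l with
  | nil => simp
  | cons x xs ih =>
      by_cases h : x = c
      · subst h; simpa [List.takeWhile_cons, List.replicate_succ] using ih
      · simp [h]

theorem bridge (c : Char) (k : Nat) :
    c :: pvTail c 1 k = pvFmt (c :: List.replicate k c) := by
  match k with
  | 0 => simp [pvTail, pvFmt]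
  | 1 => simp [pvTail, pvFmt]
  | k + 2 =>
      rw [pvTail, pvTail, pvTail_big c k 3 (by omega)]
      simp [pvFmt, List.replicate_succ]

theorem emitB_eq (l : List Char) :
    ∀ c n, 1 ≤ n →
      pvEmitB l c n =
        pvTail c n (l.takeWhile (fun x => x == c)).length ++
          pvAfun (l.dropWhile (fun x => x == c)) := by
  induction l with
  | nil => intro c n _; simp [pvEmitB, pvTail, pvAfun]
  | cons ch rest ih =>
      intro c n hn
      by_cases h : ch = c
      · subst h
        rw [pvEmitB]
        simp only [beq_self_eq_true, if_true, List.takeWhile_cons, List.dropWhile_cons,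
          List.length_cons]
        rw [pvTail, ih ch (n + 1) (by omega)]
        simp
      · have h2 : (ch == c) = false := by simp [h]
        rw [pvEmitB, h2]
        simp only [Bool.false_eq_true, if_false, List.takeWhile_cons, List.dropWhile_cons, h2,
          List.length_nil]
        rw [pvAfun, ih ch 1 (by omega), pvTail]
        have hb := bridge ch (rest.takeWhile (fun x => x == ch)).length
        rw [← takeWhile_eq_replicate rest ch] at hb
        simp only [← hb]
        simp

theorem main_eq (l : List Char) : pvLoopB l none 0 [] = pvAfun l := by
  match l with
  | [] => simp [pvLoopB, pvAfun]
  | c :: rest =>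
      rw [pvLoopB, pvAfun]
      have : (some c == (none : Option Char)) = false := rfl
      rw [this]
      simp only [Bool.false_eq_true, if_false]
      rw [loopB_emit, emitB_eq rest c 1 (by omega)]
      have hb := bridge c (rest.takeWhile (fun x => x == c)).length
      rw [← takeWhile_eq_replicate rest c] at hb
      simp [← hb]

-- ===== VERDICT (by name: the statement is the Claim_ definition above) =====
theorem string_parse_spec : Claim_equal_string_parse := by
  intro s _
  unfold Spec_string_parse string_parse string_parse_alt
  rw [Afun_eq, main_eq]
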